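-- pv_equiv track=rewrite | github.com/VUzan-bio/guard | guard/multiplex/primer_dimer.py | _consecutive_wc_runs
-- ===== SOURCE A (Python) =====
-- from typing import Dict, List, Optional, Sequence, Tuple
--
-- def _is_wc_pair(a: str, b: str) -> bool:
--     """Return True if *a* and *b* form a Watson-Crick pair."""
--     return (a, b) in {("A", "T"), ("T", "A"), ("C", "G"), ("G", "C")}
--
-- def _consecutive_wc_runs(seq1_segment: str, seq2_segment: str) -> List[Tuple[int, int]]:
--     """Find all runs of consecutive WC pairs between two equal-length segments.
--
--     Returns a list of (start, length) tuples for each consecutive run.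
--     """
--     runs: List[Tuple[int, int]] = []
--     i = 0
--     n = len(seq1_segment)
--     while i < n:
--         if _is_wc_pair(seq1_segment[i], seq2_segment[i]):
--             start = i
--             while i < n and _is_wc_pair(seq1_segment[i], seq2_segment[i]):
--                 i += 1
--             runs.append((start, i - start))
--         else:
--             i += 1
--     return runs
-- ===== SOURCE B (Python) =====
-- from typing import List, Tuple
--
-- def _is_wc_pair(a: str, b: str) -> bool:
--     """Return True if *a* and *b* form a Watson-Crick pair."""
--     return (a, b) in {("A", "T"), ("T", "A"), ("C", "G"), ("G", "C")}
--
-- def _consecutive_wc_runs(seq1_segment: str, seq2_segment: str) -> List[Tuple[int, int]]: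
--     """Find all runs of consecutive WC pairs between two equal-length segments.
--
--     Three passes: per-index match vector, run-length encoding of it,
--     then emission of (start, length) for the matching groups.
--     """
--     matches = [_is_wc_pair(seq1_segment[i], seq2_segment[i])
--                for i in range(len(seq1_segment))]
--     groups: List[Tuple[bool, int]] = []
--     for m in matches:
--         if groups and groups[-1][0] == m:
--             groups[-1] = (m, groups[-1][1] + 1)
--         else:
--             groups.append((m, 1))
--     runs: List[Tuple[int, int]] = []
--     start = 0
--     for ok, length in groups:
--         if ok:
--             runs.append((start, length))
--         start += length
--     return runs
-- ===== Notes on version B (the rewrite author's own statement) =====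
-- stated objective: alternative
-- what changed: Replaced A's nested index-based while loops with a three-pass pipeline: build the per-index Watson-Crick match vector, run-length-encode it with a last-group-merge loop, then emit (start, length) for the matching groups with a running start counter.
import Mathlib
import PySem

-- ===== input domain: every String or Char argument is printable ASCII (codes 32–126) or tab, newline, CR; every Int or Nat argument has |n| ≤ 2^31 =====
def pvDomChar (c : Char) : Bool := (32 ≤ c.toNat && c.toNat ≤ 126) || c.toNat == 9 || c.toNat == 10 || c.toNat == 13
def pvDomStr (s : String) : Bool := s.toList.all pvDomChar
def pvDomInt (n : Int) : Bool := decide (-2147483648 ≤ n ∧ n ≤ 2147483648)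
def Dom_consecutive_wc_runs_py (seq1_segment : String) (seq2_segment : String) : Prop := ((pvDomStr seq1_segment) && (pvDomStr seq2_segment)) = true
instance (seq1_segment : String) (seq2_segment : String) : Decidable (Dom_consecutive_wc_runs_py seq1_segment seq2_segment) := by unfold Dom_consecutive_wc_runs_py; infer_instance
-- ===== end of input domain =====

-- B replaces A's nested index-based while loops by a three-pass pipeline
-- (match vector, run-length encoding, emission); objective: alternative, same linear cost.

-- ===== PORT A =====

-- port of _is_wc_pair: membership in the 4-element set literal, written as a disjunction
def pvWC (a b : Char) : Bool :=
  (a == 'A' && b == 'T') || (a == 'T' && b == 'A') || (a == 'C' && b == 'G') || (a == 'G' && b == 'C')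

-- inner while loop of A: advances i while i < n and the pair at i is WC; returns the final i.
-- (fuel = n - i at each call site only makes the recursion structural; it never changes the result.
--  characters fetched with getD ' '; exact under Pre_, where every i < n is in range of both strings)
def pvScanA (l1 l2 : List Char) (n : Nat) : Nat → Nat → Nat
  | 0, i => i
  | fuel + 1, i =>
    if (i < n && pvWC (l1.getD i ' ') (l2.getD i ' ')) then pvScanA l1 l2 n fuel (i + 1) else i

-- outer while loop of A (fuel = n suffices: i strictly increases each iteration;
-- the loop-local j = value of i after the inner while is written inline)
def pvRunA (l1 l2 : List Char) (n : Nat) : Nat → Nat → List (Int × Int)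
  | 0, _ => []
  | fuel + 1, i =>
    if i < n then
      if pvWC (l1.getD i ' ') (l2.getD i ' ') then
        -- start = i; inner while; runs.append((start, i - start)); continue the outer loop
        ((i : Int), ((pvScanA l1 l2 n (n - i) i : Int) - (i : Int)))
          :: pvRunA l1 l2 n fuel (pvScanA l1 l2 n (n - i) i)
      else
        pvRunA l1 l2 n fuel (i + 1)
    else
      []

def consecutive_wc_runs_py (seq1_segment : String) (seq2_segment : String) : List (Int × Int) :=
  pvRunA seq1_segment.toList seq2_segment.toList seq1_segment.toList.length
    seq1_segment.toList.length 0

-- ===== PORT B =====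

-- one step of B's run-length-encoding loop; acc holds the groups in REVERSED order,
-- so Python's groups[-1] is acc's head
def pvRleStep (acc : List (Bool × Nat)) (m : Bool) : List (Bool × Nat) :=
  match acc with
  | (c, k) :: t => if c == m then (m, k + 1) :: t else (m, 1) :: (c, k) :: t
  | [] => [(m, 1)]

def consecutive_wc_runs_py_alt (seq1_segment : String) (seq2_segment : String) : List (Int × Int) :=
  let l1 := seq1_segment.toList
  let l2 := seq2_segment.toList
  -- matches = [_is_wc_pair(seq1_segment[i], seq2_segment[i]) for i in range(len(seq1_segment))]
  let ms := (List.range l1.length).map (fun i => pvWC (l1.getD i ' ') (l2.getD i ' '))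
  -- run-length encode matches into groups
  let groups := (ms.foldl pvRleStep []).reverse
  -- emit (start, length) for the matching groups, tracking the running start
  let res := groups.foldl
    (fun (p : List (Int × Int) × Int) g =>
      (if g.1 then p.1 ++ [(p.2, (g.2 : Int))] else p.1, p.2 + (g.2 : Int)))
    ([], 0)
  res.1

-- ===== PRECONDITION & SPEC =====
-- A evaluates seq2_segment[i] for every i < len(seq1_segment) and raises IndexError when
-- seq2_segment is shorter than seq1_segment; Pre_ excludes exactly those inputs (A returns on all others).
def Pre_consecutive_wc_runs_py (seq1_segment : String) (seq2_segment : String) : Prop :=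
  seq1_segment.toList.length ≤ seq2_segment.toList.length
instance (seq1_segment : String) (seq2_segment : String) : Decidable (Pre_consecutive_wc_runs_py seq1_segment seq2_segment) := by unfold Pre_consecutive_wc_runs_py; infer_instance

def pvWitness_consecutive_wc_runs_py : String × String := ("ATxG", "TAxC")

def Spec_consecutive_wc_runs_py (seq1_segment : String) (seq2_segment : String) (out : List (Int × Int)) : Prop := out = consecutive_wc_runs_py_alt seq1_segment seq2_segment
instance (seq1_segment : String) (seq2_segment : String) (out : List (Int × Int)) : Decidable (Spec_consecutive_wc_runs_py seq1_segment seq2_segment out) := by unfold Spec_consecutive_wc_runs_py; infer_instance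

-- ===== CLAIM (what is proved, stated in full; the proofs are below) =====
def Claim_equal_consecutive_wc_runs_py : Prop := ∀ (seq1_segment : String) (seq2_segment : String), Dom_consecutive_wc_runs_py seq1_segment seq2_segment → Pre_consecutive_wc_runs_py seq1_segment seq2_segment → Spec_consecutive_wc_runs_py seq1_segment seq2_segment (consecutive_wc_runs_py seq1_segment seq2_segment)

-- ===== LEMMAS AND PROOFS =====

theorem pv_tw_dw {α : Type} (p : α → Bool) (l : List α) : (l.dropWhile p).takeWhile p = [] := by
  induction l with
  | nil => simp
  | cons a t ih =>
    by_cases h : p a = true <;>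
      simp [List.dropWhile_cons, List.takeWhile_cons, h, ih]

theorem pv_dw_eq_drop {α : Type} (p : α → Bool) (l : List α) :
    l.dropWhile p = l.drop (l.takeWhile p).length := by
  induction l with
  | nil => simp
  | cons a t ih =>
    by_cases h : p a = true <;>
      simp [List.dropWhile_cons, List.takeWhile_cons, h, ih]

-- proof-side run-length encoding by takeWhile/dropWhile blocks
def pvRleTW : List Bool → List (Bool × Nat)
  | [] => []
  | b :: bs => (b, 1 + (bs.takeWhile (· == b)).length) :: pvRleTW (bs.dropWhile (· == b))
termination_by l => l.length
decreasing_by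
  have := List.length_dropWhile_le (fun x : Bool => x == b) bs
  simp at this ⊢ <;> omega

theorem pvRleTW_nil : pvRleTW [] = [] := by simp [pvRleTW]
theorem pvRleTW_cons (b : Bool) (bs : List Bool) :
    pvRleTW (b :: bs)
      = (b, 1 + (bs.takeWhile (· == b)).length) :: pvRleTW (bs.dropWhile (· == b)) := by
  simp [pvRleTW]

-- proof-side emitter: runs produced from the groups, block by block
def pvEmit : List (Bool × Nat) → Int → List (Int × Int)
  | [], _ => []
  | (ok, l) :: t, i => if ok then (i, (l : Int)) :: pvEmit t (i + l) else pvEmit t (i + l)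

-- proof-side block-wise reading of A's outer loop over the match vector
def pvAux : List Bool → Int → List (Int × Int)
  | [], _ => []
  | false :: bs, i => pvAux bs (i + 1)
  | true :: bs, i =>
      (i, 1 + ((bs.takeWhile (· == true)).length : Int))
        :: pvAux (bs.dropWhile (· == true)) (i + 1 + (bs.takeWhile (· == true)).length)
termination_by l => l.length
decreasing_by
  · simp
  · have := List.length_dropWhile_le (fun x : Bool => x == true) bs
    simp at this ⊢ <;> omega

theorem pvAux_nil (i : Int) : pvAux [] i = [] := by simp [pvAux]
theorem pvAux_false (bs : List Bool) (i : Int) : pvAux (false :: bs) i = pvAux bs (i + 1) := by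
  simp [pvAux]
theorem pvAux_true (bs : List Bool) (i : Int) :
    pvAux (true :: bs) i
      = (i, 1 + ((bs.takeWhile (· == true)).length : Int))
          :: pvAux (bs.dropWhile (· == true)) (i + 1 + (bs.takeWhile (· == true)).length) := by
  simp [pvAux]

theorem pvFoldRle_absorb (ms : List Bool) : ∀ (c : Bool) (k : Nat) (t : List (Bool × Nat)),
    ms.foldl pvRleStep ((c, k) :: t)
      = (ms.dropWhile (· == c)).foldl pvRleStep ((c, k + (ms.takeWhile (· == c)).length) :: t) := by
  induction ms with
  | nil => intro c k t; simp
  | cons m rest ih =>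
    intro c k t
    by_cases hm : m = c
    · subst hm
      rw [List.foldl_cons]
      have hstep : pvRleStep ((m, k) :: t) m = (m, k + 1) :: t := by simp [pvRleStep]
      rw [hstep, ih m (k + 1) t, List.takeWhile_cons, List.dropWhile_cons]
      simp only [beq_self_eq_true, if_true, List.length_cons]
      have harith : k + 1 + (rest.takeWhile (· == m)).length
          = k + ((rest.takeWhile (· == m)).length + 1) := by omega
      rw [harith]
    · have h1 : (c == m) = false := by simp [Ne.symm hm]
      have h2 : (m == c) = false := by simp [hm]
      rw [List.foldl_cons]
      have hstep : pvRleStep ((c, k) :: t) m = (m, 1) :: (c, k) :: t := by simp [pvRleStep, h1]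
      rw [hstep, List.takeWhile_cons, List.dropWhile_cons]
      simp [h2]
      rw [hstep]

theorem pvFoldRle_eq (k : Nat) : ∀ (ms : List Bool) (acc : List (Bool × Nat)),
    ms.length ≤ k →
    (∀ c kk t, acc = (c, kk) :: t → ms.takeWhile (· == c) = []) →
    (ms.foldl pvRleStep acc).reverse = acc.reverse ++ pvRleTW ms := by
  induction k with
  | zero =>
    intro ms acc hlen _
    have : ms = [] := List.eq_nil_of_length_eq_zero (Nat.le_zero.mp hlen)
    subst this; simp [pvRleTW_nil]
  | succ k ih =>
    intro ms acc hlen hhd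
    match ms with
    | [] => simp [pvRleTW_nil]
    | m :: rest =>
      have hstep : pvRleStep acc m = (m, 1) :: acc := by
        match acc with
        | [] => rfl
        | (c, kk) :: t =>
          have h1 := hhd c kk t rfl
          have hmc : (m == c) = false := by
            by_cases hb : (m == c) = true
            · rw [List.takeWhile_cons, hb] at h1; simp at h1
            · simpa using hb
          have hcm : (c == m) = false := by
            cases c <;> cases m <;> simp_all
          simp [pvRleStep, hcm]
      rw [List.foldl_cons, hstep, pvFoldRle_absorb rest m 1 acc]
      have hdw : (rest.dropWhile (· == m)).length ≤ k := by
        have := List.length_dropWhile_le (fun x : Bool => x == m) rest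
        simp at hlen; omega
      rw [ih (rest.dropWhile (· == m)) _ hdw ?_]
      · rw [pvRleTW_cons]
        simp
      · intro c kk t h
        obtain ⟨h1, h2⟩ := List.cons.inj h
        have hc : m = c := congrArg Prod.fst h1
        subst hc
        exact pv_tw_dw _ _

theorem pvEmitFold (gs : List (Bool × Nat)) : ∀ (runs : List (Int × Int)) (start : Int),
    (gs.foldl (fun (p : List (Int × Int) × Int) g =>
        (if g.1 then p.1 ++ [(p.2, (g.2 : Int))] else p.1, p.2 + (g.2 : Int))) (runs, start)).1
      = runs ++ pvEmit gs start := by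
  induction gs with
  | nil => intro runs start; simp [pvEmit]
  | cons g rest ih =>
    intro runs start
    obtain ⟨ok, l⟩ := g
    cases ok <;> simp [pvEmit, ih]

theorem pvAux_false_prefix : ∀ (pfx : List Bool), (∀ b ∈ pfx, b = false) →
    ∀ (bs : List Bool) (i : Int), pvAux (pfx ++ bs) i = pvAux bs (i + pfx.length) := by
  intro pfx
  induction pfx with
  | nil => intro _ bs i; simp
  | cons p t ih =>
    intro hall bs i
    have hp : p = false := hall p (by simp)
    subst hp
    rw [List.cons_append, pvAux_false, ih (fun b hb => hall b (by simp [hb])) bs (i + 1)]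
    congr 1
    push_cast [List.length_cons]
    ring

theorem pvAux_eq_emit (k : Nat) : ∀ (ms : List Bool) (i : Int), ms.length ≤ k →
    pvAux ms i = pvEmit (pvRleTW ms) i := by
  induction k with
  | zero =>
    intro ms i hlen
    have : ms = [] := List.eq_nil_of_length_eq_zero (Nat.le_zero.mp hlen)
    subst this; simp [pvAux_nil, pvRleTW_nil, pvEmit]
  | succ k ih =>
    intro ms i hlen
    match ms with
    | [] => simp [pvAux_nil, pvRleTW_nil, pvEmit]
    | true :: bs =>
      rw [pvAux_true, pvRleTW_cons, pvEmit]
      rw [if_pos rfl]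
      have hdw : (bs.dropWhile (· == true)).length ≤ k := by
        have := List.length_dropWhile_le (fun x : Bool => x == true) bs
        simp at hlen; omega
      rw [ih _ _ hdw]
      congr 1 <;>
        first
        | rfl
        | (push_cast; ring)
        | (congr 1 <;> first | rfl | (push_cast; ring))
    | false :: bs =>
      rw [pvAux_false, pvRleTW_cons, pvEmit]
      rw [if_neg (by simp)]
      have hsplit : bs.takeWhile (· == false) ++ bs.dropWhile (· == false) = bs :=
        List.takeWhile_append_dropWhile
      have hall : ∀ b ∈ bs.takeWhile (· == false), b = false := by
        intro b hb
        simpa using List.mem_takeWhile_imp hb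
      have hdw : (bs.dropWhile (· == false)).length ≤ k := by
        have := List.length_dropWhile_le (fun x : Bool => x == false) bs
        simp at hlen; omega
      calc pvAux bs (i + 1)
          = pvAux (bs.takeWhile (· == false) ++ bs.dropWhile (· == false)) (i + 1) := by
            rw [hsplit]
        _ = pvAux (bs.dropWhile (· == false)) (i + 1 + (bs.takeWhile (· == false)).length) :=
            pvAux_false_prefix _ hall _ _
        _ = pvEmit (pvRleTW (bs.dropWhile (· == false)))
              (i + 1 + (bs.takeWhile (· == false)).length) := ih _ _ hdw
        _ = pvEmit (pvRleTW (bs.dropWhile (· == false)))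
              (i + ((1 + (bs.takeWhile (· == false)).length : Nat) : Int)) := by
            congr 1; push_cast; ring

-- the match vector
def pvMatches (l1 l2 : List Char) : List Bool :=
  (List.range l1.length).map (fun i => pvWC (l1.getD i ' ') (l2.getD i ' '))

theorem pvMatches_len (l1 l2 : List Char) : (pvMatches l1 l2).length = l1.length := by
  simp [pvMatches]

theorem pvMatches_get (l1 l2 : List Char) (i : Nat) (h : i < l1.length) :
    (pvMatches l1 l2)[i]'(by rw [pvMatches_len]; omega)
      = pvWC (l1.getD i ' ') (l2.getD i ' ') := by
  simp [pvMatches]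

theorem pvScanA_tw (l1 l2 : List Char) : ∀ (fuel : Nat), ∀ i, l1.length - i ≤ fuel →
    pvScanA l1 l2 l1.length fuel i
      = i + (((pvMatches l1 l2).drop i).takeWhile (· == true)).length := by
  intro fuel
  induction fuel with
  | zero =>
    intro i hle
    rw [List.drop_eq_nil_of_le (by rw [pvMatches_len]; omega)]
    simp [pvScanA]
  | succ fuel ih =>
    intro i hle
    by_cases hi : i < l1.length
    · have hdrop : (pvMatches l1 l2).drop i
          = (pvMatches l1 l2)[i]'(by rw [pvMatches_len]; omega) :: (pvMatches l1 l2).drop (i + 1) :=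
        List.drop_eq_getElem_cons (by rw [pvMatches_len]; omega)
      rw [hdrop, pvMatches_get l1 l2 i hi]
      by_cases hw : pvWC (l1.getD i ' ') (l2.getD i ' ') = true
      · simp only [pvScanA]
        rw [if_pos (by simp only [Bool.and_eq_true, decide_eq_true_eq]; exact ⟨hi, hw⟩)]
        rw [ih (i + 1) (by omega)]
        rw [hw, List.takeWhile_cons]
        simp only [beq_self_eq_true, if_true, List.length_cons]
        omega
      · simp only [pvScanA]
        rw [if_neg (by simp only [Bool.and_eq_true, decide_eq_true_eq, not_and]; exact fun _ => hw)]
        have hwf : pvWC (l1.getD i ' ') (l2.getD i ' ') = false := by simpa using hw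
        rw [hwf, List.takeWhile_cons]
        simp
    · have hni : ¬ i < l1.length := hi
      simp only [pvScanA]
      rw [if_neg (by simp [hni])]
      rw [List.drop_eq_nil_of_le (by rw [pvMatches_len]; omega)]
      simp

theorem pvRunA_eq_aux (l1 l2 : List Char) : ∀ (fuel : Nat), ∀ i, l1.length - i ≤ fuel →
    pvRunA l1 l2 l1.length fuel i = pvAux ((pvMatches l1 l2).drop i) (i : Int) := by
  intro fuel
  induction fuel with
  | zero =>
    intro i hle
    rw [List.drop_eq_nil_of_le (by rw [pvMatches_len]; omega)]
    rw [pvAux_nil]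
    simp [pvRunA]
  | succ fuel ih =>
    intro i hle
    by_cases hi : i < l1.length
    · have hdrop : (pvMatches l1 l2).drop i
          = (pvMatches l1 l2)[i]'(by rw [pvMatches_len]; omega) :: (pvMatches l1 l2).drop (i + 1) :=
        List.drop_eq_getElem_cons (by rw [pvMatches_len]; omega)
      rw [hdrop, pvMatches_get l1 l2 i hi]
      by_cases hw : pvWC (l1.getD i ' ') (l2.getD i ' ') = true
      · rw [hw, pvAux_true]
        simp only [pvRunA]
        rw [if_pos hi, if_pos hw]
        have hscan := pvScanA_tw l1 l2 (l1.length - i) i (le_refl _)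
        rw [hdrop, pvMatches_get l1 l2 i hi, hw, List.takeWhile_cons] at hscan
        simp only [beq_self_eq_true, if_true, List.length_cons] at hscan
        set tl := (((pvMatches l1 l2).drop (i + 1)).takeWhile (· == true)).length with htl
        have hscan' : pvScanA l1 l2 l1.length (l1.length - i) i = i + (tl + 1) := by omega
        rw [hscan']
        rw [ih (i + (tl + 1)) (by omega)]
        have hdweq : ((pvMatches l1 l2).drop (i + 1)).dropWhile (· == true)
            = (pvMatches l1 l2).drop (i + (tl + 1)) := by
          rw [pv_dw_eq_drop, ← htl, List.drop_drop]
          first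
          | rfl
          | (congr 1; omega)
        rw [hdweq]
        congr 1 <;>
          first
          | rfl
          | (push_cast; ring)
          | (congr 1 <;> first | rfl | (push_cast; ring))
      · have hwf : pvWC (l1.getD i ' ') (l2.getD i ' ') = false := by simpa using hw
        rw [hwf, pvAux_false]
        simp only [pvRunA]
        rw [if_pos hi, if_neg hw]
        rw [ih (i + 1) (by omega)]
        push_cast
        ring_nf
    · simp only [pvRunA]
      rw [if_neg hi]
      rw [List.drop_eq_nil_of_le (by rw [pvMatches_len]; omega)]
      rw [pvAux_nil]

-- ===== VERDICT (by name: the statement is the Claim_ definition above) =====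
theorem consecutive_wc_runs_py_spec : Claim_equal_consecutive_wc_runs_py := by
  intro s1 s2 _ _
  unfold Spec_consecutive_wc_runs_py
  unfold consecutive_wc_runs_py
  rw [pvRunA_eq_aux s1.toList s2.toList s1.toList.length 0 (by omega)]
  rw [List.drop_zero]
  show pvAux (pvMatches s1.toList s2.toList) 0 = consecutive_wc_runs_py_alt s1 s2
  rw [pvAux_eq_emit (pvMatches s1.toList s2.toList).length _ _ (le_refl _)]
  simp only [consecutive_wc_runs_py_alt]
  rw [pvEmitFold]
  have hM : (List.range s1.toList.length).map
      (fun i => pvWC (s1.toList.getD i ' ') (s2.toList.getD i ' '))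
      = pvMatches s1.toList s2.toList := rfl
  rw [hM]
  rw [pvFoldRle_eq (pvMatches s1.toList s2.toList).length (pvMatches s1.toList s2.toList) []
    (le_refl _) (by intro _ _ _ h; cases h)]
  simp
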